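-- pv_equiv track=rewrite | github.com/anovickis/pyUTM | pyUTM/io.py | parse_wire_list
-- ===== SOURCE A (Python) =====
-- def parse_wire_list(raw):
--     output = {}
--     garbage = []
--     output_ptr = garbage
--
--     for line in raw:
--         if not line.startswith('['):
--             fields = line.strip().split()
--             try:
--                 output_ptr.append((fields[0], fields[1]))
--             except Exception:
--                 pass
--
--         else:
--             key = line.replace('[', '').replace(']', '').strip()
--             key = ' '.join(key.split(' ')[1:])
--             output[key] = []
--             output_ptr = output[key]
--
--     return output
-- ===== SOURCE B (Python) =====
-- def parse_wire_list(raw):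
--     # pass 1: split lines into sections: leading garbage is skipped,
--     # each '['-header opens a section collecting the following non-header lines
--     n = len(raw)
--     i = 0
--     while i < n and not raw[i].startswith('['):
--         i += 1
--     sections = []
--     while i < n:
--         header = raw[i]
--         i += 1
--         body = []
--         while i < n and not raw[i].startswith('['):
--             body.append(raw[i])
--             i += 1
--         key = ' '.join(header.replace('[', '').replace(']', '').strip().split(' ')[1:])
--         sections.append((key, body))
--     # pass 2: parse each section body into pairs; later duplicate keys overwrite
--     output = {}
--     for key, body in sections:
--         output[key] = [(f[0], f[1]) for f in map(str.split, body) if len(f) >= 2]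
--     return output
-- ===== Notes on version B (the rewrite author's own statement) =====
-- stated objective: alternative
-- what changed: A threads a mutable pointer aliasing dict values through one loop with per-line try/except; B first splits the lines into header-keyed sections (discarding leading garbage), then parses each section body into pairs with a comprehension and assembles the dict, duplicates overwriting.
import Mathlib
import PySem

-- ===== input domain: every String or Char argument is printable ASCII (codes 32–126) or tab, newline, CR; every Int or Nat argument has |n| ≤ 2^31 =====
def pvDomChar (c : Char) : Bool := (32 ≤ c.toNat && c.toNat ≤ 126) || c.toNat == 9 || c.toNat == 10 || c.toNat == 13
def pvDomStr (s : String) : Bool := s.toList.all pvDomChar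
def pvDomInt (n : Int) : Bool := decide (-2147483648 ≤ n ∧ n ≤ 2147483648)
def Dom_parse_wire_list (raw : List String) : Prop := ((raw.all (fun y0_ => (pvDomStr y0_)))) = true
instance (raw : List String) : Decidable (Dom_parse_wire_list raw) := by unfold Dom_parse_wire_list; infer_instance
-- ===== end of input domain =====

-- B replaces A's single aliasing-pointer loop by a two-pass decomposition (split into header sections,
-- then parse each section body); same return value, objective: alternative/simpler decomposition.

-- ===== PORT A =====
-- A's loop state: (garbage list, output dict, current pointer: none = garbage, some k = output[k])
def pwlStepA
    (st : List (String × String) × PySem.Dict String (List (String × String)) × Option String)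
    (line : String) :
    List (String × String) × PySem.Dict String (List (String × String)) × Option String :=
  if !(PySem.Str.startswith line "[") then
    -- fields = line.strip().split(); try: output_ptr.append((fields[0], fields[1])) except: pass
    match PySem.Str.split₀ (PySem.Str.strip line) with
    | f0 :: f1 :: _ =>
      match st with
      | (g, d, none) => (g ++ [(f0, f1)], d, none)
      | (g, d, some k) => (g, d.modify k [] (fun l => l ++ [(f0, f1)]), some k)
    | _ => st
  else
    let key := PySem.Str.strip (PySem.Str.replace (PySem.Str.replace line "[" "") "]" "")
    let key := PySem.Str.join " " (((PySem.Str.split? key " ").getD []).drop 1)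
    (st.1, st.2.1.insert key [], some key)

def parse_wire_list (raw : List String) : List (String × List (String × String)) :=
  (raw.foldl pwlStepA ([], PySem.Dict.empty, none)).2.1.items

-- ===== PORT B =====
def pwlIsHeader (l : String) : Bool := PySem.Str.startswith l "["

def pwlKey (header : String) : String :=
  PySem.Str.join " "
    (((PySem.Str.split?
        (PySem.Str.strip (PySem.Str.replace (PySem.Str.replace header "[" "") "]" "")) " ").getD []).drop 1)

-- pass 1: skip leading garbage, then one section per header line with its body lines
def pwlSections : List String → List (String × List String)
  | [] => []
  | l :: ls =>
    if pwlIsHeader l then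
      (pwlKey l, ls.takeWhile (fun x => !pwlIsHeader x)) ::
        pwlSections (ls.dropWhile (fun x => !pwlIsHeader x))
    else
      pwlSections ls
termination_by ls => ls.length
decreasing_by
  · have := List.length_dropWhile_le (fun x => !pwlIsHeader x) ls
    simp only [List.length_cons]; omega
  · simp

-- pass 2 inner comprehension: [(f[0], f[1]) for f in map(str.split, body) if len(f) >= 2]
def pwlBody (body : List String) : List (String × String) :=
  body.filterMap (fun l =>
    match PySem.Str.split₀ l with
    | f0 :: f1 :: _ => some (f0, f1)
    | _ => none)

def parse_wire_list_alt (raw : List String) : List (String × List (String × String)) :=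
  ((pwlSections raw).foldl (fun d s => d.insert s.1 (pwlBody s.2)) PySem.Dict.empty).items

-- ===== PRECONDITION & SPEC =====
def Spec_parse_wire_list (raw : List String) (out : List (String × List (String × String))) : Prop := out = parse_wire_list_alt raw
instance (raw : List String) (out : List (String × List (String × String))) : Decidable (Spec_parse_wire_list raw out) := by unfold Spec_parse_wire_list; infer_instance

-- ===== CLAIM (what is proved, stated in full; the proofs are below) =====
def Claim_equal_parse_wire_list : Prop := ∀ (raw : List String), Dom_parse_wire_list raw → Spec_parse_wire_list raw (parse_wire_list raw)

-- ===== LEMMAS AND PROOFS =====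

-- s.strip().split() == s.split(): stripping whitespace does not change whitespace-splitting
theorem pwl_go_nil (cur : List Char) (acc : List (List Char)) :
    PySem.Chars.split₀.go [] cur acc
      = if cur.isEmpty then acc.reverse else (cur.reverse :: acc).reverse := rfl

theorem pwl_go_cons (c : Char) (rest cur : List Char) (acc : List (List Char)) :
    PySem.Chars.split₀.go (c :: rest) cur acc
      = if PySem.Chars.isspace c then
          (if cur.isEmpty then PySem.Chars.split₀.go rest [] acc
           else PySem.Chars.split₀.go rest [] (cur.reverse :: acc))
        else PySem.Chars.split₀.go rest (c :: cur) acc := by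
  conv_lhs => rw [PySem.Chars.split₀.go]

theorem pwl_go_spaces (sp : List Char) (cur : List Char) (acc : List (List Char))
    (h : ∀ c ∈ sp, PySem.Chars.isspace c = true) :
    PySem.Chars.split₀.go sp cur acc = PySem.Chars.split₀.go [] cur acc := by
  induction sp generalizing cur acc with
  | nil => rfl
  | cons c sp ih =>
    rw [pwl_go_cons, h c (List.mem_cons_self ..)]
    have ih' := fun cur acc => ih cur acc (fun x hx => h x (List.mem_cons_of_mem _ hx))
    by_cases hc : cur.isEmpty <;> simp [hc, ih', pwl_go_nil]

theorem pwl_go_append_spaces (a sp : List Char) (cur : List Char) (acc : List (List Char))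
    (h : ∀ c ∈ sp, PySem.Chars.isspace c = true) :
    PySem.Chars.split₀.go (a ++ sp) cur acc = PySem.Chars.split₀.go a cur acc := by
  induction a generalizing cur acc with
  | nil => simpa using pwl_go_spaces sp cur acc h
  | cons c a ih =>
    rw [List.cons_append, pwl_go_cons, pwl_go_cons]
    by_cases hc : PySem.Chars.isspace c <;> by_cases he : cur.isEmpty <;> simp [hc, he, ih]

theorem pwl_go_dropWhile (s : List Char) (acc : List (List Char)) :
    PySem.Chars.split₀.go (List.dropWhile PySem.Chars.isspace s) [] acc
      = PySem.Chars.split₀.go s [] acc := by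
  induction s with
  | nil => rfl
  | cons c s ih =>
    by_cases hc : PySem.Chars.isspace c
    · rw [List.dropWhile_cons_of_pos hc, ih, pwl_go_cons]
      simp [hc]
    · rw [List.dropWhile_cons_of_neg (by simp [hc])]

theorem pwl_chars_split_strip (s : List Char) :
    PySem.Chars.split₀ (PySem.Chars.strip s) = PySem.Chars.split₀ s := by
  unfold PySem.Chars.split₀ PySem.Chars.strip PySem.Chars.rstrip PySem.Chars.lstrip
  set t := List.dropWhile PySem.Chars.isspace s with ht
  have hdecomp : (List.dropWhile PySem.Chars.isspace t.reverse).reverse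
      ++ (List.takeWhile PySem.Chars.isspace t.reverse).reverse = t := by
    rw [← List.reverse_append, List.takeWhile_append_dropWhile, List.reverse_reverse]
  have hsp : ∀ c ∈ (List.takeWhile PySem.Chars.isspace t.reverse).reverse,
      PySem.Chars.isspace c = true := by
    intro c hc
    exact List.mem_takeWhile_imp (List.mem_reverse.mp hc)
  calc PySem.Chars.split₀.go (List.dropWhile PySem.Chars.isspace t.reverse).reverse [] []
      = PySem.Chars.split₀.go ((List.dropWhile PySem.Chars.isspace t.reverse).reverse
          ++ (List.takeWhile PySem.Chars.isspace t.reverse).reverse) [] [] :=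
        (pwl_go_append_spaces _ _ _ _ hsp).symm
    _ = PySem.Chars.split₀.go t [] [] := by rw [hdecomp]
    _ = PySem.Chars.split₀.go s [] [] := by rw [ht]; exact pwl_go_dropWhile s []

theorem pwl_split_strip (s : String) :
    PySem.Str.split₀ (PySem.Str.strip s) = PySem.Str.split₀ s := by
  simp [PySem.Str.split₀, PySem.Str.toList_strip, pwl_chars_split_strip]

theorem pwl_modify_insert (d : PySem.Dict String (List (String × String)))
    (k : String) (acc : List (String × String)) (p : String × String) :
    (d.insert k acc).modify k [] (fun l => l ++ [p]) = d.insert k (acc ++ [p]) := by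
  unfold PySem.Dict.modify
  rw [PySem.Dict.getD_insert_self, PySem.Dict.insert_insert_self]

-- reductions of A's step
theorem pwl_stepA_header (st : List (String × String) × PySem.Dict String (List (String × String)) × Option String)
    (l : String) (hh : pwlIsHeader l = true) :
    pwlStepA st l = (st.1, st.2.1.insert (pwlKey l) [], some (pwlKey l)) := by
  have hc : PySem.Chars.startswith l.toList ['['] = true := by
    unfold pwlIsHeader at hh; simpa using hh
  simp [pwlStepA, pwlKey, hc]

-- the body phase: pointer at key k with accumulated pairs acc
theorem pwl_body_lemma (ls : List String) (g : List (String × String))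
    (d : PySem.Dict String (List (String × String))) (k : String) (acc : List (String × String)) :
    (ls.foldl pwlStepA (g, d.insert k acc, some k)).2.1
      = (pwlSections (ls.dropWhile (fun x => !pwlIsHeader x))).foldl
          (fun d s => d.insert s.1 (pwlBody s.2))
          (d.insert k (acc ++ pwlBody (ls.takeWhile (fun x => !pwlIsHeader x)))) := by
  induction ls generalizing d k acc with
  | nil => simp [pwlSections, pwlBody]
  | cons l ls ih =>
    by_cases hh : pwlIsHeader l = true
    · rw [List.foldl_cons, pwl_stepA_header _ _ hh,
        List.dropWhile_cons_of_neg (by simp [hh]), List.takeWhile_cons_of_neg (by simp [hh])]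
      rw [show pwlSections (l :: ls)
            = (pwlKey l, ls.takeWhile (fun x => !pwlIsHeader x)) ::
                pwlSections (ls.dropWhile (fun x => !pwlIsHeader x)) by rw [pwlSections]; simp [hh]]
      simp only [List.foldl_cons]
      rw [ih]
      simp [pwlBody]
    · have hs : PySem.Chars.startswith l.toList ['['] = false := by
        unfold pwlIsHeader at hh; simpa using hh
      rw [List.foldl_cons,
        List.dropWhile_cons_of_pos (by simp [hh]), List.takeWhile_cons_of_pos (by simp [hh])]
      rcases hsp : PySem.Str.split₀ l with _ | ⟨f0, _ | ⟨f1, rest⟩⟩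
      · have hstep : pwlStepA (g, d.insert k acc, some k) l = (g, d.insert k acc, some k) := by
          simp [pwlStepA, hs, pwl_split_strip, hsp]
        rw [hstep, ih]
        simp [pwlBody, hsp]
      · have hstep : pwlStepA (g, d.insert k acc, some k) l = (g, d.insert k acc, some k) := by
          simp [pwlStepA, hs, pwl_split_strip, hsp]
        rw [hstep, ih]
        simp [pwlBody, hsp]
      · have hstep : pwlStepA (g, d.insert k acc, some k) l
            = (g, d.insert k (acc ++ [(f0, f1)]), some k) := by
          simp [pwlStepA, hs, pwl_split_strip, hsp, pwl_modify_insert]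
        rw [hstep, ih]
        simp [pwlBody, hsp]

-- the garbage phase: pointer at the discarded garbage list
theorem pwl_garbage_lemma (ls : List String) (g : List (String × String))
    (d : PySem.Dict String (List (String × String))) :
    (ls.foldl pwlStepA (g, d, none)).2.1
      = (pwlSections ls).foldl (fun d s => d.insert s.1 (pwlBody s.2)) d := by
  induction ls generalizing g d with
  | nil => simp [pwlSections]
  | cons l ls ih =>
    by_cases hh : pwlIsHeader l = true
    · rw [List.foldl_cons, pwl_stepA_header _ _ hh]
      rw [show pwlSections (l :: ls)
            = (pwlKey l, ls.takeWhile (fun x => !pwlIsHeader x)) ::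
                pwlSections (ls.dropWhile (fun x => !pwlIsHeader x)) by rw [pwlSections]; simp [hh]]
      simp only [List.foldl_cons]
      have := pwl_body_lemma ls g d (pwlKey l) []
      simpa using this
    · have hs : PySem.Chars.startswith l.toList ['['] = false := by
        unfold pwlIsHeader at hh; simpa using hh
      rw [show pwlSections (l :: ls) = pwlSections ls by rw [pwlSections]; simp [hh]]
      rcases hsp : PySem.Str.split₀ l with _ | ⟨f0, _ | ⟨f1, rest⟩⟩
      · rw [List.foldl_cons,
          show pwlStepA (g, d, none) l = (g, d, none) by
            simp [pwlStepA, hs, pwl_split_strip, hsp]]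
        exact ih _ _
      · rw [List.foldl_cons,
          show pwlStepA (g, d, none) l = (g, d, none) by
            simp [pwlStepA, hs, pwl_split_strip, hsp]]
        exact ih _ _
      · rw [List.foldl_cons,
          show pwlStepA (g, d, none) l = (g ++ [(f0, f1)], d, none) by
            simp [pwlStepA, hs, pwl_split_strip, hsp]]
        exact ih _ _

-- ===== VERDICT (by name: the statement is the Claim_ definition above) =====
theorem parse_wire_list_spec : Claim_equal_parse_wire_list := by
  intro raw _
  unfold Spec_parse_wire_list parse_wire_list parse_wire_list_alt
  rw [pwl_garbage_lemma]
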